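-- pv_equiv track=rewrite | github.com/asalt/MSPCRunner | src/mspcrunner/ext/annotate_site/annotate_protein.py | parse_rawname
-- ===== SOURCE A (Python) =====
-- from typing import Iterable, Tuple
--
-- def parse_rawname(name: str) -> Tuple[str, str, str]:
--     """yield up to the first 3 numbers in a string separated by underscore
--     returns None when number is missing / interrupted
--     """
--     namesplit = name.split("_")
--     yield_counter = 0
--     for x in namesplit:
--         if x.isnumeric() and yield_counter < 3:
--             yield_counter += 1
--             yield x
--         else:
--             break
--     while yield_counter < 3:
--         yield_counter += 1
--         yield None
-- ===== SOURCE B (Python) =====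
-- def parse_rawname(name):
--     """Recursive descent: peel one token at a time with str.partition, no split list, no counter."""
--     def go(s, k):
--         if k == 0:
--             return []
--         head, sep, rest = s.partition("_")
--         if not head.isnumeric():
--             return [None] * k
--         return [head] + (go(rest, k - 1) if sep else [None] * (k - 1))
--     yield from go(name, 3)
-- ===== Notes on version B (the rewrite author's own statement) =====
-- stated objective: alternative
-- what changed: A splits the whole string once and runs one interleaved scan with a yield counter, break and a trailing None-padding while-loop; B never builds the split list: it recursively peels one token at a time with str.partition, counting remaining slots down and returning the None padding from the recursion's base cases.
import Mathlib
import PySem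

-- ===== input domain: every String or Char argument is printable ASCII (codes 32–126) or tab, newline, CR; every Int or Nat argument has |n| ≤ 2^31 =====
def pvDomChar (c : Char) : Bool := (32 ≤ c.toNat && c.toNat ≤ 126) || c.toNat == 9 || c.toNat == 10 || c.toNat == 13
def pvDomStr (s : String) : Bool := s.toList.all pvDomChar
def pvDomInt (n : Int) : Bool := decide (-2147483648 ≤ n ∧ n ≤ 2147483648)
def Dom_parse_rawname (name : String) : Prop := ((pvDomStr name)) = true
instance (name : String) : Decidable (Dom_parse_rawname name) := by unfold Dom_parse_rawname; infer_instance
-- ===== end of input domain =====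

-- B replaces A's split-then-scan loop (counter, break, trailing while) by a recursive descent that
-- peels one token at a time with str.partition; same cost, a different decomposition.
-- On the ASCII domain str.isnumeric coincides with str.isdigit, so both ports use PySem strIsdigit (exact on Dom).

-- ===== PORT A =====
-- the trailing 'while yield_counter < 3: yield None' loop
def pvWhileA (c : Nat) : List (Option String) :=
  if c < 3 then none :: pvWhileA (c + 1) else []
termination_by 3 - c

-- the 'for x in namesplit' loop with its break and counter
def pvForA : List String → Nat → List (Option String)
  | [], c => pvWhileA c
  | x :: rest, c =>
      if PySem.Str.strIsdigit x && decide (c < 3) then some x :: pvForA rest (c + 1)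
      else pvWhileA c

def parse_rawname (name : String) : List (Option String) :=
  -- sep "_" is nonempty, so split? is always some; getD [] just unwraps it
  pvForA ((PySem.Str.split? name "_").getD []) 0

-- ===== PORT B =====
-- s.partition("_") : (chars before the first '_', whether a '_' was found, chars after it)
def pvPartitionB : List Char → List Char × Bool × List Char
  | [] => ([], false, [])
  | c :: rest =>
      if c = '_' then ([], true, rest)
      else
        let p := pvPartitionB rest
        (c :: p.1, p.2.1, p.2.2)

-- the inner recursive 'go(s, k)' of Source B (k counts remaining slots, from 3 down to 0)
def pvGoB : List Char → Nat → List (Option String)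
  | _, 0 => []
  | s, k + 1 =>
      let p := pvPartitionB s
      if ¬ PySem.Chars.strIsdigit p.1 then List.replicate (k + 1) none
      else some (String.ofList p.1) :: (if p.2.1 then pvGoB p.2.2 k else List.replicate k none)

def parse_rawname_alt (name : String) : List (Option String) :=
  pvGoB name.toList 3

-- ===== PRECONDITION & SPEC =====
def Spec_parse_rawname (name : String) (out : List (Option String)) : Prop := out = parse_rawname_alt name
instance (name : String) (out : List (Option String)) : Decidable (Spec_parse_rawname name out) := by unfold Spec_parse_rawname; infer_instance

-- ===== CLAIM (what is proved, stated in full; the proofs are below) =====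
def Claim_equal_parse_rawname : Prop := ∀ (name : String), Dom_parse_rawname name → Spec_parse_rawname name (parse_rawname name)

-- ===== LEMMAS AND PROOFS =====

-- single-char '_'-split as a plain structural recursion (pre = reversed current token, already scanned)
def pvSplit1 (pre : List Char) : List Char → List (List Char)
  | [] => [pre]
  | c :: rest => if c = '_' then pre :: pvSplit1 [] rest else pvSplit1 (pre ++ [c]) rest

theorem pvGo_eq (l : List Char) : ∀ (fuel : Nat) (cur : List Char) (acc : List (List Char)),
    l.length ≤ fuel →
    PySem.Chars.splitOn.go ['_'] fuel l cur acc = acc.reverse ++ pvSplit1 cur.reverse l := by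
  induction l with
  | nil =>
    intro fuel cur acc _
    cases fuel <;> simp [PySem.Chars.splitOn.go, pvSplit1]
  | cons c rest ih =>
    intro fuel cur acc hf
    cases fuel with
    | zero => simp at hf
    | succ f =>
      simp only [PySem.Chars.splitOn.go]
      by_cases hc : c = '_'
      · subst hc
        simp [List.isPrefixOf, ih f [] (cur.reverse :: acc) (by simpa using hf), pvSplit1]
      · have hp : (['_'].isPrefixOf (c :: rest)) = false := by
          simp [List.isPrefixOf, Ne.symm hc]
        simp [hp, hc, ih f (c :: cur) acc (by simpa using hf), pvSplit1]

theorem pvSplitOn_eq (s : List Char) : PySem.Chars.splitOn s ['_'] = pvSplit1 [] s := by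
  simpa using pvGo_eq s (s.length + 1) [] [] (by omega)

theorem pvSplit1_partition (s : List Char) : ∀ (pre : List Char),
    pvSplit1 pre s =
      if (pvPartitionB s).2.1 then (pre ++ (pvPartitionB s).1) :: pvSplit1 [] (pvPartitionB s).2.2
      else [pre ++ (pvPartitionB s).1] := by
  induction s with
  | nil => intro pre; simp [pvSplit1, pvPartitionB]
  | cons c rest ih =>
    intro pre
    by_cases hc : c = '_'
    · subst hc; simp [pvSplit1, pvPartitionB]
    · simp only [pvSplit1, pvPartitionB, if_neg hc, ih (pre ++ [c])]
      split <;> simp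

theorem pvWhileA_eq (c : Nat) : pvWhileA c = List.replicate (3 - c) none := by
  unfold pvWhileA
  split
  · rw [pvWhileA_eq (c + 1)]
    have h : 3 - c = (3 - (c + 1)) + 1 := by omega
    rw [h, List.replicate_succ]
  · have h : 3 - c = 0 := by omega
    simp [h]
termination_by 3 - c

theorem pvMain (f : Nat) : ∀ (s : List Char), f ≤ 3 →
    pvForA ((pvSplit1 [] s).map String.ofList) (3 - f) = pvGoB s f := by
  induction f with
  | zero =>
    intro s _
    rcases h : pvSplit1 [] s with _ | ⟨x, rest⟩ <;>
      simp [pvForA, pvGoB, pvWhileA_eq]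
  | succ f ih =>
    intro s hf
    have e1 : 2 - f < 3 := by omega
    have e2 : 3 - (2 - f) = f + 1 := by omega
    have e4 : 2 - f + 1 = 3 - f := by omega
    have e5 : 3 - (3 - f) = f := by omega
    rw [pvSplit1_partition s []]
    rcases hsep : (pvPartitionB s).2.1 with _ | _ <;>
      rcases hd : PySem.Chars.strIsdigit (pvPartitionB s).1 with _ | _ <;>
      simp [pvForA, pvGoB, hsep, hd, pvWhileA_eq, e1, e2, e4, e5,
        ih (pvPartitionB s).2.2 (by omega)]

-- ===== VERDICT (by name: the statement is the Claim_ definition above) =====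
theorem parse_rawname_spec : Claim_equal_parse_rawname := by
  intro name _
  show parse_rawname name = parse_rawname_alt name
  unfold parse_rawname parse_rawname_alt
  simp only [PySem.Str.split?, PySem.Chars.split?, show "_".toList = ['_'] from rfl,
    List.isEmpty_cons, Bool.false_eq_true, if_false, Option.map_some, Option.getD_some]
  rw [pvSplitOn_eq]
  exact pvMain 3 name.toList (by omega)
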